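-- pv_equiv track=rewrite | github.com/SmileyJoe/playground_python_bitwise | Text.py | __convert
-- ===== SOURCE A (Python) =====
-- def __convert(text_input, floor, ceil, diff):
--     text = []
--     for char in text_input:
--         char_value = ord(char)
--         if char_value > floor and floor <= char_value <= ceil:
--             text.append(chr(char_value - diff))
--         else:
--             text.append(char)
--     return ''.join(text)
-- ===== SOURCE B (Python) =====
-- def __convert(text_input, floor, ceil, diff):
--     # Divide and conquer: recurse on halves, shift a single char at the base.
--     n = len(text_input)
--     if n == 0:
--         return text_input
--     if n == 1:
--         v = ord(text_input)
--         if floor < v <= ceil: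
--             return chr(v - diff)
--         return text_input
--     mid = n // 2
--     return (__convert(text_input[:mid], floor, ceil, diff)
--             + __convert(text_input[mid:], floor, ceil, diff))
-- ===== Notes on version B (the rewrite author's own statement) =====
-- stated objective: alternative
-- what changed: B replaces A's left-to-right accumulator loop by a divide-and-conquer recursion that splits the string in halves and shifts only at the single-character base case, concatenating the results.
-- outside the precondition, e.g. on __convert('a', 0, 200, 200): A raises ValueError, B raises ValueError
import Mathlib
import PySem

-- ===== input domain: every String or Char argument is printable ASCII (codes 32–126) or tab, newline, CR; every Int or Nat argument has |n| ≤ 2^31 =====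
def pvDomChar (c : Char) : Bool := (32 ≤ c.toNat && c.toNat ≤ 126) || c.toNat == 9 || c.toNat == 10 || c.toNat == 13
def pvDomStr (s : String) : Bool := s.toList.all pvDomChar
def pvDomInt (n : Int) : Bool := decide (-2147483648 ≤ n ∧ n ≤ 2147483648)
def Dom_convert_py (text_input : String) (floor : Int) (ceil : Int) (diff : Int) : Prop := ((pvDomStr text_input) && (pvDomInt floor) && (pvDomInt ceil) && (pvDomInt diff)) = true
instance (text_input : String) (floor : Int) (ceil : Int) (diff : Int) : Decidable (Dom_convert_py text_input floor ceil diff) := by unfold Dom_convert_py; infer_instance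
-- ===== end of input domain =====

-- B replaces A's left-to-right accumulator loop by a divide-and-conquer recursion on halves
-- with the shift done only at the single-character base case (alternative decomposition).

-- ===== PORT A =====
-- chr(n) is ported as Char.ofNat n.toNat; exact because Pre_convert_py restricts to inputs
-- where every shifted code is a valid (non-surrogate, in-range) Unicode scalar value.
def convert_py (text_input : String) (floor : Int) (ceil : Int) (diff : Int) : String :=
  String.mk (text_input.toList.foldl
    (fun (text : List Char) (char : Char) =>
      let char_value : Int := (char.toNat : Int)
      if char_value > floor ∧ (floor ≤ char_value ∧ char_value ≤ ceil) then
        text ++ [Char.ofNat (char_value - diff).toNat]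
      else
        text ++ [char])
    [])

-- ===== PORT B =====
-- the divide-and-conquer recursion of Source B, over the string's character list;
-- text_input[:mid] / [mid:] become List.take / List.drop at length / 2.
def pvDC (floor ceil diff : Int) : List Char → List Char
  | [] => []
  | [c] =>
      if floor < (c.toNat : Int) ∧ (c.toNat : Int) ≤ ceil then
        [Char.ofNat ((c.toNat : Int) - diff).toNat]   -- chr(v - diff), exact under Pre_convert_py
      else [c]
  | c1 :: c2 :: rest =>
      pvDC floor ceil diff ((c1 :: c2 :: rest).take ((c1 :: c2 :: rest).length / 2)) ++
      pvDC floor ceil diff ((c1 :: c2 :: rest).drop ((c1 :: c2 :: rest).length / 2))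
termination_by L => L.length
decreasing_by
  · simp [List.length_take]; omega
  · simp; omega

def convert_py_alt (text_input : String) (floor : Int) (ceil : Int) (diff : Int) : String :=
  String.mk (pvDC floor ceil diff text_input.toList)

-- ===== PRECONDITION & SPEC =====
-- Pre_ excludes inputs where a shifted code point leaves the Unicode range (Python's chr
-- raises ValueError there) or lands in the surrogate range D800–DFFF (Python returns a
-- lone-surrogate string that Lean's Char/String type cannot represent).
def Pre_convert_py (text_input : String) (floor : Int) (ceil : Int) (diff : Int) : Prop :=
  (text_input.toList.all (fun c =>
    !(decide (floor < (c.toNat : Int)) && decide ((c.toNat : Int) ≤ ceil)) ||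
    (decide (0 ≤ (c.toNat : Int) - diff) &&
      (decide ((c.toNat : Int) - diff < 0xD800) ||
        (decide (0xE000 ≤ (c.toNat : Int) - diff) && decide ((c.toNat : Int) - diff ≤ 0x10FFFF)))))) = true
instance (text_input : String) (floor : Int) (ceil : Int) (diff : Int) : Decidable (Pre_convert_py text_input floor ceil diff) := by unfold Pre_convert_py; infer_instance

def pvWitness_convert_py : String × Int × Int × Int := ("Az", 64, 90, 1)

def Spec_convert_py (text_input : String) (floor : Int) (ceil : Int) (diff : Int) (out : String) : Prop := out = convert_py_alt text_input floor ceil diff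
instance (text_input : String) (floor : Int) (ceil : Int) (diff : Int) (out : String) : Decidable (Spec_convert_py text_input floor ceil diff out) := by unfold Spec_convert_py; infer_instance

-- ===== CLAIM (what is proved, stated in full; the proofs are below) =====
def Claim_equal_convert_py : Prop := ∀ (text_input : String) (floor : Int) (ceil : Int) (diff : Int), Dom_convert_py text_input floor ceil diff → Pre_convert_py text_input floor ceil diff → Spec_convert_py text_input floor ceil diff (convert_py text_input floor ceil diff)

-- ===== LEMMAS AND PROOFS =====

-- the per-character shift both programs apply
def pvShift (floor ceil diff : Int) (c : Char) : Char :=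
  if floor < (c.toNat : Int) ∧ (c.toNat : Int) ≤ ceil then
    Char.ofNat ((c.toNat : Int) - diff).toNat
  else c

-- B's divide-and-conquer computes the pointwise map (strong induction on the length).
theorem pvDC_eq_map (floor ceil diff : Int) :
    ∀ (n : Nat) (L : List Char), L.length ≤ n →
      pvDC floor ceil diff L = L.map (pvShift floor ceil diff) := by
  intro n
  induction n with
  | zero =>
      intro L h
      have : L = [] := List.eq_nil_of_length_eq_zero (Nat.le_zero.mp h)
      subst this; simp [pvDC]
  | succ n ih =>
      intro L h
      match L with
      | [] => simp [pvDC]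
      | [c] => simp [pvDC, pvShift]; split <;> rfl
      | c1 :: c2 :: rest =>
          rw [pvDC]
          have hlen : (c1 :: c2 :: rest).length ≤ n + 1 := h
          have h2 : 2 ≤ (c1 :: c2 :: rest).length := by simp
          have htake : ((c1 :: c2 :: rest).take ((c1 :: c2 :: rest).length / 2)).length ≤ n := by
            rw [List.length_take]
            simp only [List.length_cons] at *
            omega
          have hdrop : ((c1 :: c2 :: rest).drop ((c1 :: c2 :: rest).length / 2)).length ≤ n := by
            rw [List.length_drop]
            simp only [List.length_cons] at *
            omega
          rw [ih _ htake, ih _ hdrop, ← List.map_append, List.take_append_drop]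

-- A's fold computes the same pointwise map.
theorem convert_py_eq_map (text_input : String) (floor ceil diff : Int) :
    convert_py text_input floor ceil diff
    = String.mk (text_input.toList.map (pvShift floor ceil diff)) := by
  unfold convert_py
  congr 1
  have step : ∀ (acc : List Char) (x : Char), x ∈ text_input.toList →
      (fun (text : List Char) (char : Char) =>
        let char_value : Int := (char.toNat : Int)
        if char_value > floor ∧ (floor ≤ char_value ∧ char_value ≤ ceil) then
          text ++ [Char.ofNat (char_value - diff).toNat]
        else text ++ [char]) acc x
      = acc ++ [pvShift floor ceil diff x] := by
    intro acc x _
    by_cases h : floor < (x.toNat : Int) ∧ (x.toNat : Int) ≤ ceil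
    · have h' : (x.toNat : Int) > floor ∧ ((floor ≤ (x.toNat : Int)) ∧ (x.toNat : Int) ≤ ceil) :=
        ⟨h.1, le_of_lt h.1, h.2⟩
      simp [pvShift, h, h']
    · have h' : ¬ ((x.toNat : Int) > floor ∧ ((floor ≤ (x.toNat : Int)) ∧ (x.toNat : Int) ≤ ceil)) :=
        fun hh => h ⟨hh.1, hh.2.2⟩
      simp [pvShift, h, h']
  exact (PySem.List.foldl_congr_mem _ _ _ _ step).trans
    (by rw [PySem.List.foldl_append_singleton_eq_map, List.nil_append])

-- ===== VERDICT (by name: the statement is the Claim_ definition above) =====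
theorem convert_py_spec : Claim_equal_convert_py := by
  intro text_input floor ceil diff _ _
  unfold Spec_convert_py convert_py_alt
  rw [convert_py_eq_map, pvDC_eq_map floor ceil diff text_input.toList.length _ (le_refl _)]
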